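-- pv_equiv track=rewrite | github.com/YingLunTown-DreamLand/Structural-Translator | Api/translateCommand.py | highSearching
-- ===== SOURCE A (Python) =====
-- def highSearching(command:str,pointer:int,input:list)->int:
--     List = [[command.find(i,pointer),len(i)] for i in input]
--     ans = []
--     for i in List:
--         if i[0] != -1:
--             ans.append(i)
--     ans.sort()
--     return [
--         ans[0][0],
--         ans[0][1]
--     ]
-- ===== SOURCE B (Python) =====
-- def highSearching(command: str, pointer: int, input: list) -> int:
--     # Single pass: keep the lexicographically smallest (position, length) seen so far.
--     best = None
--     for s in input:
--         pos = command.find(s, pointer)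
--         if pos == -1:
--             continue
--         key = (pos, len(s))
--         if best is None or key < best:
--             best = key
--     return [best[0], best[1]]
-- ===== Notes on version B (the rewrite author's own statement) =====
-- stated objective: simpler
-- what changed: A builds a [pos,len] list for every substring, filter-copies the matches, sorts them and indexes the head; B is a single loop over input keeping the lexicographically smallest (pos,len) pair seen so far.
import Mathlib
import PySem

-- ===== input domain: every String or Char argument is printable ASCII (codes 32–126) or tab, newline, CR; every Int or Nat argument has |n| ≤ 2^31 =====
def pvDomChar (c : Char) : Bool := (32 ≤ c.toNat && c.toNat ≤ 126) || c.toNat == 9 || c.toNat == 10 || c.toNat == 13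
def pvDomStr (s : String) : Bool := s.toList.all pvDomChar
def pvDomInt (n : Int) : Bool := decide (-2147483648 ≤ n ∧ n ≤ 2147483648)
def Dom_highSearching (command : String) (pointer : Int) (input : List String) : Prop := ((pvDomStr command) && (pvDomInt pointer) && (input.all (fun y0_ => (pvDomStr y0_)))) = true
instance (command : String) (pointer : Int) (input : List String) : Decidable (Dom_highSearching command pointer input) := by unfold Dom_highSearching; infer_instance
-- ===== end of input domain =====

-- B fuses A's build/filter/sort passes into one running-minimum loop over `input` (objective: simpler one-pass alternative).


-- ===== PORT A =====
-- Python's 2-element lists [pos, len] are ported as pairs (Int × Int); list.sort() on them is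
-- the lexicographic tuple sort PySem.List.sorted2.
def highSearching (command : String) (pointer : Int) (input : List String) : List Int :=
  let L := input.map (fun i => (PySem.Str.findFrom command i pointer none, PySem.Str.len i))
  let ans := L.foldl (fun acc i => if i.1 ≠ -1 then acc ++ [i] else acc) []
  let ans := PySem.List.sorted2 ans Prod.fst Prod.snd
  [(PySem.List.pyGetD ans 0 (0, 0)).1, (PySem.List.pyGetD ans 0 (0, 0)).2]

-- ===== PORT B =====
def highSearching_alt (command : String) (pointer : Int) (input : List String) : List Int :=
  let best := input.foldl (fun best s =>
    let pos := PySem.Str.findFrom command s pointer none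
    if pos = -1 then best
    else
      let key := (pos, PySem.Str.len s)
      match best with
      | none => some key
      | some b => if key.1 < b.1 ∨ (key.1 = b.1 ∧ key.2 < b.2) then some key else some b) none
  match best with
  | some b => [b.1, b.2]
  | none => []   -- Source B raises TypeError here (best is None); excluded by Pre_

-- ===== PRECONDITION & SPEC =====
-- Pre_ excludes exactly the inputs on which A raises IndexError (no substring matches, ans is empty,
-- ans[0] fails); B's Python raises a TypeError there.
def Pre_highSearching (command : String) (pointer : Int) (input : List String) : Prop :=
  ∃ s ∈ input, PySem.Str.findFrom command s pointer none ≠ -1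
instance (command : String) (pointer : Int) (input : List String) : Decidable (Pre_highSearching command pointer input) := by unfold Pre_highSearching; infer_instance

def pvWitness_highSearching : String × Int × List String := ("abc", 0, ["b"])

def Spec_highSearching (command : String) (pointer : Int) (input : List String) (out : List Int) : Prop := out = highSearching_alt command pointer input
instance (command : String) (pointer : Int) (input : List String) (out : List Int) : Decidable (Spec_highSearching command pointer input out) := by unfold Spec_highSearching; infer_instance

-- ===== CLAIM (what is proved, stated in full; the proofs are below) =====
def Claim_equal_highSearching : Prop := ∀ (command : String) (pointer : Int) (input : List String), Dom_highSearching command pointer input → Pre_highSearching command pointer input → Spec_highSearching command pointer input (highSearching command pointer input)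

-- ===== LEMMAS AND PROOFS =====

-- the comparison sorted2 uses for the tuple key (fst, snd)
def pvBefore (a b : Int × Int) : Bool :=
  decide (a.1 < b.1) || (!decide (b.1 < a.1) && decide (a.2 < b.2))

-- B's running-minimum step, phrased with pvBefore
def pvMinStep (b : Option (Int × Int)) (k : Int × Int) : Option (Int × Int) :=
  match b with
  | none => some k
  | some m => if pvBefore k m then some k else some m

lemma pvBefore_iff (k b : Int × Int) :
    pvBefore k b = true ↔ (k.1 < b.1 ∨ (k.1 = b.1 ∧ k.2 < b.2)) := by
  simp only [pvBefore, Bool.or_eq_true, Bool.and_eq_true, Bool.not_eq_true', decide_eq_true_eq,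
    decide_eq_false_iff_not]
  omega

-- B's update test is pvBefore (lexicographic tuple comparison)
lemma step_eq (k : Int × Int) (acc : Option (Int × Int)) :
    (match acc with
     | none => some k
     | some b => if k.1 < b.1 ∨ (k.1 = b.1 ∧ k.2 < b.2) then some k else some b) = pvMinStep acc k := by
  cases acc with
  | none => rfl
  | some b =>
      simp only [pvMinStep]
      by_cases h : pvBefore k b
      · rw [if_pos ((pvBefore_iff k b).mp h), if_pos h]
      · rw [if_neg (fun hc => h ((pvBefore_iff k b).mpr hc)), if_neg h]

-- B's single loop = a pvMinStep fold over the filtered key list (A's `ans`)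
lemma bfold (command : String) (pointer : Int) (input : List String)
    (acc : Option (Int × Int)) :
    input.foldl (fun best s =>
      let pos := PySem.Str.findFrom command s pointer none
      if pos = -1 then best
      else
        let key := (pos, PySem.Str.len s)
        match best with
        | none => some key
        | some b => if key.1 < b.1 ∨ (key.1 = b.1 ∧ key.2 < b.2) then some key else some b) acc
    = ((input.map (fun i => (PySem.Str.findFrom command i pointer none, PySem.Str.len i))).filter
        (fun i => i.1 ≠ -1)).foldl pvMinStep acc := by
  induction input generalizing acc with
  | nil => rfl
  | cons s t ih =>
      rw [List.foldl_cons, List.map_cons, List.filter_cons, ih]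
      by_cases h : PySem.Str.findFrom command s pointer none = -1
      · rw [if_pos h]
        have : (decide ¬((PySem.Str.findFrom command s pointer none, PySem.Str.len s) : Int × Int).1 = -1) = false := by
          rw [h]; simp
        simp only [ne_eq, this, Bool.false_eq_true, if_false]
      · rw [if_neg h]
        have : (decide ¬((PySem.Str.findFrom command s pointer none, PySem.Str.len s) : Int × Int).1 = -1) = true := by
          simp only [decide_eq_true_eq]; exact h
        simp only [ne_eq, this, if_true, List.foldl_cons]
        rw [step_eq]

-- head of insertBy is the smaller of x and the old head
lemma head?_insertBy (x : Int × Int) (l : List (Int × Int)) :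
    (PySem.List.insertBy pvBefore x l).head? = some ((pvMinStep l.head? x).getD x) := by
  cases l with
  | nil => simp [PySem.List.insertBy, pvMinStep]
  | cons m t =>
      simp only [PySem.List.insertBy, pvMinStep, List.head?]
      by_cases h : pvBefore x m <;> simp [h]

-- head of A's sort = B's running minimum over the same list
lemma sorted2_head? (ps : List (Int × Int)) :
    (PySem.List.sorted2 ps Prod.fst Prod.snd).head? = ps.foldl pvMinStep none := by
  induction ps using List.reverseRecOn with
  | nil => rfl
  | append_singleton t x ih =>
      have hs : PySem.List.sorted2 (t ++ [x]) Prod.fst Prod.snd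
          = PySem.List.insertBy pvBefore x (PySem.List.sorted2 t Prod.fst Prod.snd) := by
        unfold pvBefore; simp [PySem.List.sorted2, List.foldl_append]
      rw [hs, List.foldl_append, head?_insertBy, ← ih]
      cases hh : (PySem.List.sorted2 t Prod.fst Prod.snd).head? with
      | none => simp [pvMinStep]
      | some m => by_cases h : pvBefore x m <;> simp [pvMinStep, h, List.foldl]

lemma foldl_minStep_ne_none (ps : List (Int × Int)) (b : Int × Int) :
    ps.foldl pvMinStep (some b) ≠ none := by
  induction ps generalizing b with
  | nil => simp
  | cons q t ih =>
      simp only [List.foldl_cons, pvMinStep]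
      by_cases h : pvBefore q b <;> simp [h, ih]

-- ===== VERDICT (by name: the statement is the Claim_ definition above) =====
theorem highSearching_spec : Claim_equal_highSearching := by
  intro command pointer input _ hpre
  simp only [Spec_highSearching, highSearching, highSearching_alt]
  rw [bfold]
  have hA : (input.map (fun i => ((PySem.Str.findFrom command i pointer none, PySem.Str.len i) : Int × Int))).foldl
      (fun acc i => if i.1 ≠ -1 then acc ++ [i] else acc) []
      = (input.map (fun i => ((PySem.Str.findFrom command i pointer none, PySem.Str.len i) : Int × Int))).filter
        (fun i => i.1 ≠ -1) := by
    simpa using PySem.List.foldl_append_if (fun i : Int × Int => decide (i.1 ≠ -1)) id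
      (input.map (fun i => ((PySem.Str.findFrom command i pointer none, PySem.Str.len i) : Int × Int))) []
  rw [hA]
  have hne : (input.map (fun i => ((PySem.Str.findFrom command i pointer none, PySem.Str.len i) : Int × Int))).filter
      (fun i => i.1 ≠ -1) ≠ [] := by
    obtain ⟨s, hs, hf⟩ := hpre
    intro hnil
    have hmem : ((PySem.Str.findFrom command s pointer none, PySem.Str.len s) : Int × Int) ∈
        (input.map (fun i => ((PySem.Str.findFrom command i pointer none, PySem.Str.len i) : Int × Int))).filter
          (fun i => i.1 ≠ -1) := by
      refine List.mem_filter.mpr ⟨List.mem_map_of_mem hs, ?_⟩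
      simpa using hf
    rw [hnil] at hmem; exact absurd hmem (List.not_mem_nil)
  obtain ⟨b, hb⟩ : ∃ b, ((input.map (fun i => ((PySem.Str.findFrom command i pointer none, PySem.Str.len i) : Int × Int))).filter
      (fun i => i.1 ≠ -1)).foldl pvMinStep none = some b := by
    cases hq : (input.map (fun i => ((PySem.Str.findFrom command i pointer none, PySem.Str.len i) : Int × Int))).filter
        (fun i => i.1 ≠ -1) with
    | nil => exact absurd hq hne
    | cons q r =>
        rw [List.foldl_cons]
        cases hbb : r.foldl pvMinStep (pvMinStep none q) with
        | none => exact absurd hbb (foldl_minStep_ne_none r q)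
        | some b => exact ⟨b, rfl⟩
  rw [hb]
  have hhead : (PySem.List.sorted2 ((input.map (fun i => ((PySem.Str.findFrom command i pointer none, PySem.Str.len i) : Int × Int))).filter
      (fun i => i.1 ≠ -1)) Prod.fst Prod.snd).head? = some b := by
    rw [sorted2_head?, hb]
  have hget : PySem.List.pyGetD (PySem.List.sorted2 ((input.map (fun i => ((PySem.Str.findFrom command i pointer none, PySem.Str.len i) : Int × Int))).filter
      (fun i => i.1 ≠ -1)) Prod.fst Prod.snd) 0 ((0 : Int), (0 : Int)) = b := by
    rw [PySem.List.pyGetD_zero]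
    cases hq : PySem.List.sorted2 ((input.map (fun i => ((PySem.Str.findFrom command i pointer none, PySem.Str.len i) : Int × Int))).filter
        (fun i => i.1 ≠ -1)) Prod.fst Prod.snd with
    | nil => rw [hq] at hhead; simp at hhead
    | cons q r => rw [hq] at hhead; simp at hhead; simp [hhead]
  rw [hget]
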